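-- pv_equiv track=rewrite | github.com/yje9802/Algorithms | 프로그래머스/2/86971. 전력망을 둘로 나누기/전력망을 둘로 나누기.py | solution
-- ===== SOURCE A (Python) =====
-- def solution(n, wires):
--     answer = n
--
--     def dfs(start, graph, visited, removed):
--         visited[start] = True
--         count = 1
--
--         for node in graph[start]:
--             if node == removed:
--                 continue
--             if not visited[node]:
--                 count += dfs(node, graph, visited, removed)
--
--         return count
--
--     graph = [[] for _ in range(n+1)] # 연결된 노드 저장
--     for u, v in wires:
--         graph[u].append(v)
--         graph[v].append(u)
--
--     for u, v in wires:
--         visited = [False] * (n+1)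
--         cnt = dfs(u, graph, visited, v)
--         diff = abs(cnt - (n - cnt))
--         answer = min(answer, diff)
--
--     return answer
-- ===== SOURCE B (Python) =====
-- def solution(n, wires):
--     # Edge-list fixpoint (semi-naive closure) instead of recursive DFS over an adjacency list.
--     best = n
--     for u, v in wires:
--         visited = [False] * (n + 1)
--         visited[u] = True
--         changed = True
--         while changed:
--             changed = False
--             for a, b in wires:
--                 if visited[a] and b != v and not visited[b]:
--                     visited[b] = True
--                     changed = True
--                 if visited[b] and a != v and not visited[a]:
--                     visited[a] = True
--                     changed = True
--         cnt = sum(visited)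
--         best = min(best, abs(2 * cnt - n))
--     return best
-- ===== Notes on version B (the rewrite author's own statement) =====
-- stated objective: alternative
-- what changed: B drops A's recursive DFS and its prebuilt adjacency list entirely: per removed wire it grows the visited set by repeatedly relaxing the raw edge list until a full pass changes nothing (fixpoint closure).
import Mathlib
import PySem

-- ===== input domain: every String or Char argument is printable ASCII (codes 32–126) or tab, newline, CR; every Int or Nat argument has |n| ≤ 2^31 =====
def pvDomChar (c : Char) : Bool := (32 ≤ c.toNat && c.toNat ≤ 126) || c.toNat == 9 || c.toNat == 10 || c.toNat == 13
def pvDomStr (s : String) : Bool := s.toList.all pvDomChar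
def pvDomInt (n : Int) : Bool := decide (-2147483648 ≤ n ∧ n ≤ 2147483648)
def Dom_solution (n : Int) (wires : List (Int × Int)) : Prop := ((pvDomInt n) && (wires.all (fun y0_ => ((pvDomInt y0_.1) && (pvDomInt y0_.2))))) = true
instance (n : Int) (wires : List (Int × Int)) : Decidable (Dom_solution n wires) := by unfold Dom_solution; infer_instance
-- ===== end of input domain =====

-- B replaces A's recursive DFS over an adjacency list by a fixpoint closure over the raw edge list (alternative algorithm, no speed claim).


-- ===== PORT A =====
-- graph = [[] for _ in range(n+1)]; for u, v in wires: graph[u].append(v); graph[v].append(u)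
def pvBuildGraph (wires : List (Int × Int)) (g0 : List (List Int)) : List (List Int) :=
  wires.foldl (fun g p =>
    let g1 := PySem.List.pySetD g p.1 (PySem.List.pyGetD g p.1 [] ++ [p.2])
    PySem.List.pySetD g1 p.2 (PySem.List.pyGetD g1 p.2 [] ++ [p.1])) g0

-- one iteration of 'for node in graph[start]' (body of A's dfs); s = (count, visited)
def pvStepA (graph : List (List Int)) (removed : Int)
    (dfs : Int → List Bool → Int × List Bool) (s : Int × List Bool) (node : Int) : Int × List Bool :=
  if node == removed then s
  else if PySem.List.pyGetD s.2 node false then s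
  else
    let r := dfs node s.2
    (s.1 + r.1, r.2)

-- A's dfs: visited[start] = True; count = 1; loop over graph[start].  fuel only guards
-- termination: the recursion depth is at most the number of cells, and fuel starts above it.
def pvDfsA (graph : List (List Int)) (removed : Int) : Nat → Int → List Bool → Int × List Bool
  | 0, _, V => (0, V)
  | fuel+1, start, V =>
      (PySem.List.pyGetD graph start []).foldl
        (pvStepA graph removed (pvDfsA graph removed fuel))
        (1, PySem.List.pySetD V start true)

def solution (n : Int) (wires : List (Int × Int)) : Int :=
  let graph := pvBuildGraph wires (List.replicate (n+1).toNat [])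
  wires.foldl (fun answer p =>
    let visited := List.replicate (n+1).toNat false
    let cnt := (pvDfsA graph p.2 ((n+1).toNat + 1) p.1 visited).1
    min answer |cnt - (n - cnt)|) n

-- ===== PORT B =====
-- one 'if visited[a] and b != v and not visited[b]: visited[b] = True; changed = True' block
def pvRelax (v : Int) (s : List Bool × Bool) (a b : Int) : List Bool × Bool :=
  if PySem.List.pyGetD s.1 a false && !(b == v) && !(PySem.List.pyGetD s.1 b false)
  then (PySem.List.pySetD s.1 b true, true) else s

-- body of 'for a, b in wires' (both directions); s = (visited, changed)
def pvStepB (v : Int) (s : List Bool × Bool) (p : Int × Int) : List Bool × Bool :=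
  pvRelax v (pvRelax v s p.1 p.2) p.2 p.1

def pvPassB (wires : List (Int × Int)) (v : Int) (V : List Bool) : List Bool × Bool :=
  wires.foldl (pvStepB v) (V, false)

-- 'while changed:' — fuel only guards termination: each repeated pass marks a new cell,
-- so at most length+1 passes run, and fuel starts above that.
def pvLoopB (wires : List (Int × Int)) (v : Int) : Nat → List Bool → List Bool
  | 0, V => V
  | fuel+1, V =>
      let r := pvPassB wires v V
      if r.2 then pvLoopB wires v fuel r.1 else r.1

def solution_alt (n : Int) (wires : List (Int × Int)) : Int :=
  wires.foldl (fun best p =>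
    let V0 := PySem.List.pySetD (List.replicate (n+1).toNat false) p.1 true
    let Vf := pvLoopB wires p.2 ((n+1).toNat + 1) V0
    min best |2 * (Vf.count true : Int) - n|) n

-- ===== PRECONDITION & SPEC =====
-- Pre_ excludes exactly the inputs where A raises IndexError: a nonempty wire list with n < 0,
-- or a wire endpoint outside Python's index range [-(n+1), n] of the length-(n+1) lists.
def Pre_solution (n : Int) (wires : List (Int × Int)) : Prop :=
  ∀ p ∈ wires, 0 ≤ n ∧ -(n+1) ≤ p.1 ∧ p.1 ≤ n ∧ -(n+1) ≤ p.2 ∧ p.2 ≤ n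
instance (n : Int) (wires : List (Int × Int)) : Decidable (Pre_solution n wires) := by unfold Pre_solution; infer_instance
def pvWitness_solution : Int × (List (Int × Int)) := (4, [(1, 2), (2, 3), (2, 4)])

def Spec_solution (n : Int) (wires : List (Int × Int)) (out : Int) : Prop := out = solution_alt n wires
instance (n : Int) (wires : List (Int × Int)) (out : Int) : Decidable (Spec_solution n wires out) := by unfold Spec_solution; infer_instance

-- ===== CLAIM (what is proved, stated in full; the proofs are below) =====
def Claim_equal_solution : Prop := ∀ (n : Int) (wires : List (Int × Int)), Dom_solution n wires → Pre_solution n wires → Spec_solution n wires (solution n wires)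

-- ===== LEMMAS AND PROOFS =====

-- the cell of the length-m Python list that index i addresses (i in range)
def pvCell (m : Nat) (i : Int) : Nat := if 0 ≤ i then i.toNat else m - (-i).toNat
def pvInR (m : Nat) (i : Int) : Prop := -(m:Int) ≤ i ∧ i < (m:Int)
def pvGv (V : List Bool) (j : Nat) : Bool := V.getD j false
def pvLe (V W : List Bool) : Prop := ∀ j, pvGv V j = true → pvGv W j = true
def pvAdj (graph : List (List Int)) (j : Nat) : List Int := graph.getD j []

lemma pvCell_lt {m : Nat} {i : Int} (h : pvInR m i) : pvCell m i < m := by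
  rcases h with ⟨h1, h2⟩; unfold pvCell; split_ifs <;> omega

lemma pyIdx_eq {m : Nat} {i : Int} (h : pvInR m i) :
    PySem.List.pyIdx? m i = some (pvCell m i) := by
  rcases h with ⟨h1, h2⟩
  simp only [PySem.List.pyIdx?, pvCell]
  split_ifs <;> first | rfl | omega

lemma pyGetD_bridge {α : Type} {m : Nat} (xs : List α) (d : α) {i : Int}
    (hlen : xs.length = m) (h : pvInR m i) :
    PySem.List.pyGetD xs i d = xs.getD (pvCell m i) d := by
  subst hlen
  simp only [PySem.List.pyGetD, PySem.List.pyGet?, pyIdx_eq h, Option.bind_some]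
  rfl

lemma pySetD_bridge {α : Type} {m : Nat} (xs : List α) (v : α) {i : Int}
    (hlen : xs.length = m) (h : pvInR m i) :
    PySem.List.pySetD xs i v = xs.set (pvCell m i) v := by
  subst hlen
  simp only [PySem.List.pySetD, PySem.List.pySet?, pyIdx_eq h, Option.map_some, Option.getD_some]

lemma getD_set {α : Type} (xs : List α) (k j : Nat) (v d : α) :
    (xs.set k v).getD j d = if k = j ∧ k < xs.length then v else xs.getD j d := by
  show ((xs.set k v)[j]?).getD d = _
  rw [List.getElem?_set]
  split_ifs with h1 h2 h3 <;> simp_all [List.getD] <;> omega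

lemma gv_def (V : List Bool) (j : Nat) : V.getD j false = pvGv V j := rfl

lemma gv_set (V : List Bool) (k j : Nat) (b : Bool) :
    pvGv (V.set k b) j = if k = j ∧ k < V.length then b else pvGv V j := getD_set V k j b false

lemma gv_replicate (m j : Nat) : pvGv (List.replicate m false) j = false := by
  unfold pvGv
  simp [List.getD, List.getElem?_replicate]
  split <;> simp


lemma pySetD_len {a : Type} (xs : List a) (i : Int) (v : a) :
    (PySem.List.pySetD xs i v).length = xs.length := by
  unfold PySem.List.pySetD PySem.List.pySet?
  cases PySem.List.pyIdx? xs.length i <;> simp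

lemma gv_eq_getElem {V : List Bool} {j : Nat} (hj : j < V.length) : pvGv V j = V[j] := by
  unfold pvGv; simp [List.getD, List.getElem?_eq_getElem hj]

lemma count_false_pos {V : List Bool} {j : Nat} (hj : j < V.length) (hf : pvGv V j = false) :
    1 ≤ V.count false := by
  have hm : false ∈ V := by
    have := gv_eq_getElem hj
    rw [hf] at this
    exact this ▸ List.getElem_mem hj
  exact List.count_pos_iff.mpr hm

lemma count_set_true {V : List Bool} {j : Nat} (hj : j < V.length) (hf : pvGv V j = false) :
    (V.set j true).count true = V.count true + 1 := by
  induction V generalizing j with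
  | nil => simp at hj
  | cons x xs ih =>
    cases j with
    | zero =>
      have hx : x = false := by simpa [pvGv, List.getD] using hf
      subst hx; simp [List.count_cons]
    | succ k =>
      have hk : k < xs.length := by simpa using hj
      have : pvGv xs k = false := by simpa [pvGv, List.getD] using hf
      simp only [List.set, List.count_cons, ih hk this]
      omega

lemma count_true_replicate (m : Nat) : (List.replicate m false).count true = 0 := by
  simp [List.count_replicate]

lemma pvLe_refl (V : List Bool) : pvLe V V := fun _ h => h

lemma pvLe_trans {U V W : List Bool} (h1 : pvLe U V) (h2 : pvLe V W) : pvLe U W :=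
  fun j h => h2 j (h1 j h)

lemma pvLe_set_true {V : List Bool} {k : Nat} {W : List Bool}
    (h1 : pvLe V W) (h2 : pvGv W k = true) : pvLe (V.set k true) W := by
  intro j hj
  rw [gv_set] at hj
  by_cases h : k = j ∧ k < V.length
  · exact h.1 ▸ h2
  · rw [if_neg h] at hj; exact h1 j hj

lemma pvLe_of_set {V : List Bool} {k : Nat} : pvLe V (V.set k true) := by
  intro j hj
  rw [gv_set]
  split_ifs with h
  · rfl
  · exact hj

lemma pvEq_of_le_le {V W : List Bool} (hl : V.length = W.length)
    (h1 : pvLe V W) (h2 : pvLe W V) : V = W := by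
  apply List.ext_getElem hl
  intro j hj hj'
  have e1 := gv_eq_getElem hj
  have e2 := gv_eq_getElem hj'
  cases hv : V[j] with
  | true =>
    have h := h1 j (by rw [e1, hv])
    rw [e2] at h
    exact h.symm
  | false =>
    cases hw : W[j] with
    | false => simp [hv, hw]
    | true =>
      have h := h2 j (by rw [e2, hw])
      rw [e1, hv] at h
      cases h

-- ===== adjacency-list characterisation (PORT A's graph build) =====

lemma build_len (wires : List (Int × Int)) (g : List (List Int)) :
    (pvBuildGraph wires g).length = g.length := by
  induction wires generalizing g with
  | nil => rfl
  | cons p rest ih =>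
    show (pvBuildGraph rest _).length = _
    rw [ih]; simp [pySetD_len]

lemma adj_set {g : List (List Int)} {k j : Nat} {L : List Int} :
    pvAdj (g.set k L) j = if k = j ∧ k < g.length then L else pvAdj g j := getD_set g k j L []

def pvStepG (g : List (List Int)) (p : Int × Int) : List (List Int) :=
  let g1 := PySem.List.pySetD g p.1 (PySem.List.pyGetD g p.1 [] ++ [p.2])
  PySem.List.pySetD g1 p.2 (PySem.List.pyGetD g1 p.2 [] ++ [p.1])

lemma build_cons (p : Int × Int) (rest : List (Int × Int)) (g : List (List Int)) :
    pvBuildGraph (p :: rest) g = pvBuildGraph rest (pvStepG g p) := rfl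

lemma stepG_len (g : List (List Int)) (p : Int × Int) : (pvStepG g p).length = g.length := by
  unfold pvStepG; simp [pySetD_len]

lemma step_adj {m : Nat} {p : Int × Int} (hp1 : pvInR m p.1) (hp2 : pvInR m p.2)
    (g : List (List Int)) (hg : g.length = m) (j : Nat) (b : Int) :
    b ∈ pvAdj (pvStepG g p) j ↔
      b ∈ pvAdj g j ∨ (pvCell m p.1 = j ∧ b = p.2) ∨ (pvCell m p.2 = j ∧ b = p.1) := by
  have hc1 : pvCell m p.1 < m := pvCell_lt hp1
  have hc2 : pvCell m p.2 < m := pvCell_lt hp2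
  unfold pvStepG
  dsimp only
  rw [pyGetD_bridge g [] hg hp1, pySetD_bridge g _ hg hp1]
  have hg1 : (g.set (pvCell m p.1) (g.getD (pvCell m p.1) [] ++ [p.2])).length = m := by simp [hg]
  rw [pyGetD_bridge _ [] hg1 hp2, pySetD_bridge _ _ hg1 hp2]
  show b ∈ pvAdj (List.set _ _ _) j ↔ _
  rw [adj_set]
  by_cases e2 : pvCell m p.2 = j <;>
    by_cases e1 : pvCell m p.1 = j <;>
      simp_all [adj_set, pvAdj, List.length_set, List.mem_append]

lemma build_adj_sound {m : Nat} {wires : List (Int × Int)}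
    (hw : ∀ p ∈ wires, pvInR m p.1 ∧ pvInR m p.2) :
    ∀ (g : List (List Int)), g.length = m → ∀ j b, b ∈ pvAdj (pvBuildGraph wires g) j →
      b ∈ pvAdj g j ∨ ∃ p ∈ wires, (pvCell m p.1 = j ∧ b = p.2) ∨ (pvCell m p.2 = j ∧ b = p.1) := by
  induction wires with
  | nil => intro g _ j b hb; exact Or.inl hb
  | cons p rest ih =>
    intro g hg j b hb
    rw [build_cons] at hb
    have hp := hw p (by simp)
    have hrest : ∀ q ∈ rest, pvInR m q.1 ∧ pvInR m q.2 := fun q hq => hw q (by simp [hq])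
    rcases ih hrest (pvStepG g p) (by rw [stepG_len, hg]) j b hb with h | ⟨q, hq, hcase⟩
    · rcases (step_adj hp.1 hp.2 g hg j b).mp h with h' | h' | h'
      · exact Or.inl h'
      · exact Or.inr ⟨p, by simp, Or.inl h'⟩
      · exact Or.inr ⟨p, by simp, Or.inr h'⟩
    · exact Or.inr ⟨q, by simp [hq], hcase⟩

lemma build_adj_mono {m : Nat} {wires : List (Int × Int)}
    (hw : ∀ p ∈ wires, pvInR m p.1 ∧ pvInR m p.2) :
    ∀ (g : List (List Int)), g.length = m →
      ∀ (j : Nat) (b : Int), b ∈ pvAdj g j → b ∈ pvAdj (pvBuildGraph wires g) j := by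
  induction wires with
  | nil => intro g _ j b hb; exact hb
  | cons p rest ih =>
    intro g hg j b hb
    rw [build_cons]
    have hp := hw p (by simp)
    exact ih (fun q hq => hw q (by simp [hq])) (pvStepG g p) (by rw [stepG_len, hg]) j b
      ((step_adj hp.1 hp.2 g hg j b).mpr (Or.inl hb))

lemma build_adj_complete {m : Nat} {wires : List (Int × Int)}
    (hw : ∀ p ∈ wires, pvInR m p.1 ∧ pvInR m p.2) :
    ∀ (g : List (List Int)), g.length = m → ∀ p ∈ wires,
      p.2 ∈ pvAdj (pvBuildGraph wires g) (pvCell m p.1) ∧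
      p.1 ∈ pvAdj (pvBuildGraph wires g) (pvCell m p.2) := by
  induction wires with
  | nil => intro g _ p hp; simp at hp
  | cons q rest ih =>
    intro g hg p hp
    have hq := hw q (by simp)
    have hrest : ∀ r ∈ rest, pvInR m r.1 ∧ pvInR m r.2 := fun r hr => hw r (by simp [hr])
    have hg' : (pvStepG g q).length = m := by rw [stepG_len, hg]
    rw [build_cons]
    rcases List.mem_cons.mp hp with rfl | hp'
    · constructor
      · exact build_adj_mono hrest (pvStepG g p) hg' _ _
          ((step_adj hq.1 hq.2 g hg _ _).mpr (Or.inr (Or.inl ⟨rfl, rfl⟩)))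
      · exact build_adj_mono hrest (pvStepG g p) hg' _ _
          ((step_adj hq.1 hq.2 g hg _ _).mpr (Or.inr (Or.inr ⟨rfl, rfl⟩)))
    · exact ih hrest (pvStepG g q) hg' p hp'

lemma adj_replicate (m j : Nat) : pvAdj (List.replicate m ([] : List Int)) j = [] := by
  unfold pvAdj
  simp [List.getD, List.getElem?_replicate]
  split <;> simp

lemma adj_iff {m : Nat} {wires : List (Int × Int)}
    (hw : ∀ p ∈ wires, pvInR m p.1 ∧ pvInR m p.2) (j : Nat) (b : Int) :
    b ∈ pvAdj (pvBuildGraph wires (List.replicate m [])) j ↔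
      ∃ p ∈ wires, (pvCell m p.1 = j ∧ b = p.2) ∨ (pvCell m p.2 = j ∧ b = p.1) := by
  constructor
  · intro hb
    rcases build_adj_sound hw _ (by simp) j b hb with h | h
    · rw [adj_replicate] at h; simp at h
    · exact h
  · rintro ⟨p, hp, hcase⟩
    have hc := build_adj_complete hw (List.replicate m []) (by simp) p hp
    rcases hcase with ⟨rfl, rfl⟩ | ⟨rfl, rfl⟩
    · exact hc.1
    · exact hc.2

lemma adjR_of_wires {m : Nat} {wires : List (Int × Int)}
    (hw : ∀ p ∈ wires, pvInR m p.1 ∧ pvInR m p.2) :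
    ∀ j b, b ∈ pvAdj (pvBuildGraph wires (List.replicate m [])) j → pvInR m b := by
  intro j b hb
  rcases (adj_iff hw j b).mp hb with ⟨p, hp, ⟨_, rfl⟩ | ⟨_, rfl⟩⟩
  · exact (hw p hp).2
  · exact (hw p hp).1

-- ===== closure predicates =====

def pvClosedA (graph : List (List Int)) (removed : Int) (m : Nat) (W : List Bool) : Prop :=
  ∀ j, j < m → pvGv W j = true → ∀ b ∈ pvAdj graph j, b ≠ removed → pvGv W (pvCell m b) = true

def pvPairClosed (v : Int) (m : Nat) (p : Int × Int) (W : List Bool) : Prop :=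
  (pvGv W (pvCell m p.1) = true → p.2 ≠ v → pvGv W (pvCell m p.2) = true) ∧
  (pvGv W (pvCell m p.2) = true → p.1 ≠ v → pvGv W (pvCell m p.1) = true)

def pvClosedW (wires : List (Int × Int)) (v : Int) (m : Nat) (W : List Bool) : Prop :=
  ∀ p ∈ wires, pvPairClosed v m p W

-- ===== PORT A: dfs specification =====

lemma adj_def (g : List (List Int)) (j : Nat) : g.getD j [] = pvAdj g j := rfl

lemma dfsA_len {graph : List (List Int)} {removed : Int} :
    ∀ fuel (start : Int) (V : List Bool),
      (pvDfsA graph removed fuel start V).2.length = V.length := by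
  intro fuel
  induction fuel with
  | zero => intro start V; rfl
  | succ f ih =>
    intro start V
    have aux : ∀ (nodes : List Int) (s : Int × List Bool),
        ((nodes.foldl (pvStepA graph removed (pvDfsA graph removed f)) s).2).length = s.2.length := by
      intro nodes
      induction nodes with
      | nil => intro s; rfl
      | cons node rest ihn =>
        intro s
        rw [List.foldl_cons, ihn]
        unfold pvStepA
        split_ifs <;> simp [ih]
    simp only [pvDfsA]
    rw [aux, pySetD_len]

def pvDfsPack (graph : List (List Int)) (removed : Int) (m : Nat) (fuel : Nat) : Prop :=
  ∀ start V, pvInR m start → V.length = m → pvGv V (pvCell m start) = false →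
    V.count false < fuel →
    (pvDfsA graph removed fuel start V).2.length = m ∧
    pvLe V (pvDfsA graph removed fuel start V).2 ∧
    V.count true ≤ (pvDfsA graph removed fuel start V).2.count true ∧
    pvGv (pvDfsA graph removed fuel start V).2 (pvCell m start) = true ∧
    (∀ j, pvGv V j = false → pvGv (pvDfsA graph removed fuel start V).2 j = true →
      ∀ b ∈ pvAdj graph j, b ≠ removed →
        pvGv (pvDfsA graph removed fuel start V).2 (pvCell m b) = true) ∧
    (pvDfsA graph removed fuel start V).1 =
      ((pvDfsA graph removed fuel start V).2.count true : Int) - (V.count true : Int)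

lemma foldA_spec {graph : List (List Int)} {removed : Int} {m : Nat} {f : Nat}
    (hdfs : pvDfsPack graph removed m f) :
    ∀ (nodes : List Int), (∀ b ∈ nodes, pvInR m b) →
    ∀ (cnt : Int) (V : List Bool), V.length = m → V.count false < f →
      ((nodes.foldl (pvStepA graph removed (pvDfsA graph removed f)) (cnt, V)).2.length = m) ∧
      pvLe V (nodes.foldl (pvStepA graph removed (pvDfsA graph removed f)) (cnt, V)).2 ∧
      V.count true ≤ (nodes.foldl (pvStepA graph removed (pvDfsA graph removed f)) (cnt, V)).2.count true ∧
      (∀ b ∈ nodes, b ≠ removed →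
        pvGv (nodes.foldl (pvStepA graph removed (pvDfsA graph removed f)) (cnt, V)).2 (pvCell m b) = true) ∧
      (∀ j, pvGv V j = false →
        pvGv (nodes.foldl (pvStepA graph removed (pvDfsA graph removed f)) (cnt, V)).2 j = true →
        ∀ b ∈ pvAdj graph j, b ≠ removed →
          pvGv (nodes.foldl (pvStepA graph removed (pvDfsA graph removed f)) (cnt, V)).2 (pvCell m b) = true) ∧
      (nodes.foldl (pvStepA graph removed (pvDfsA graph removed f)) (cnt, V)).1 =
        cnt + (((nodes.foldl (pvStepA graph removed (pvDfsA graph removed f)) (cnt, V)).2.count true : Int)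
               - (V.count true : Int)) := by
  intro nodes
  induction nodes with
  | nil =>
    intro _ cnt V hl hcf
    simp only [List.foldl_nil]
    refine ⟨hl, pvLe_refl V, le_refl _, fun b hb => absurd hb (List.not_mem_nil), ?_, by omega⟩
    intro j h1 h2
    rw [h1] at h2
    cases h2
  | cons node rest ihn =>
    intro hn cnt V hl hcf
    rw [List.foldl_cons]
    have hnode : pvInR m node := hn node (by simp)
    have hrest : ∀ b ∈ rest, pvInR m b := fun b hb => hn b (by simp [hb])
    by_cases hrem : (node == removed) = true
    · have hstep : pvStepA graph removed (pvDfsA graph removed f) (cnt, V) node = (cnt, V) := by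
        unfold pvStepA; rw [if_pos hrem]
      rw [hstep]
      obtain ⟨a1, a2, a3, a4, a5, a6⟩ := ihn hrest cnt V hl hcf
      refine ⟨a1, a2, a3, ?_, a5, a6⟩
      intro b hb hbr
      rcases List.mem_cons.mp hb with rfl | hb'
      · exact absurd (by simpa using hrem) hbr
      · exact a4 b hb' hbr
    · by_cases hvis : PySem.List.pyGetD V node false = true
      · have hstep : pvStepA graph removed (pvDfsA graph removed f) (cnt, V) node = (cnt, V) := by
          unfold pvStepA; rw [if_neg (by simp [hrem]), if_pos hvis]
        rw [hstep]
        obtain ⟨a1, a2, a3, a4, a5, a6⟩ := ihn hrest cnt V hl hcf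
        refine ⟨a1, a2, a3, ?_, a5, a6⟩
        intro b hb hbr
        rcases List.mem_cons.mp hb with rfl | hb'
        · exact a2 _ (by rw [← gv_def, ← pyGetD_bridge V false hl hnode]; exact hvis)
        · exact a4 b hb' hbr
      · have hstep : pvStepA graph removed (pvDfsA graph removed f) (cnt, V) node =
            (cnt + (pvDfsA graph removed f node V).1, (pvDfsA graph removed f node V).2) := by
          unfold pvStepA; rw [if_neg (by simp [hrem]), if_neg hvis]
        rw [hstep]
        have hgv : pvGv V (pvCell m node) = false := by
          rw [← gv_def, ← pyGetD_bridge V false hl hnode]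
          exact Bool.eq_false_iff.mpr hvis
        obtain ⟨d1, d2, d3, d4, d5, d6⟩ := hdfs node V hnode hl hgv hcf
        have hcf' : (pvDfsA graph removed f node V).2.count false < f := by
          have t1 := List.count_true_add_count_false V
          have t2 := List.count_true_add_count_false (pvDfsA graph removed f node V).2
          rw [hl] at t1
          rw [d1] at t2
          omega
        obtain ⟨a1, a2, a3, a4, a5, a6⟩ :=
          ihn hrest (cnt + (pvDfsA graph removed f node V).1) (pvDfsA graph removed f node V).2 d1 hcf'
        refine ⟨a1, pvLe_trans d2 a2, le_trans d3 a3, ?_, ?_, ?_⟩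
        · intro b hb hbr
          rcases List.mem_cons.mp hb with rfl | hb'
          · exact a2 _ d4
          · exact a4 b hb' hbr
        · intro j hj1 hj2 b hb hbr
          by_cases hj3 : pvGv (pvDfsA graph removed f node V).2 j = true
          · exact a2 _ (d5 j hj1 hj3 b hb hbr)
          · exact a5 j (Bool.eq_false_iff.mpr hj3) hj2 b hb hbr
        · omega

lemma dfsA_spec {graph : List (List Int)} {removed : Int} {m : Nat}
    (hgl : graph.length = m)
    (hAdjR : ∀ j b, b ∈ pvAdj graph j → pvInR m b) :
    ∀ fuel, pvDfsPack graph removed m fuel := by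
  intro fuel
  induction fuel with
  | zero => intro start V _ _ _ h; omega
  | succ f ih =>
    intro start V hstart hl hgv hcf
    have hcs : pvCell m start < m := pvCell_lt hstart
    have hV1l : (V.set (pvCell m start) true).length = m := by simp [hl]
    have hcnt := count_set_true (V := V) (j := pvCell m start) (by omega) hgv
    have hcf1 : (V.set (pvCell m start) true).count false < f := by
      have t1 := List.count_true_add_count_false V
      have t2 := List.count_true_add_count_false (V.set (pvCell m start) true)
      have hpos := count_false_pos (V := V) (j := pvCell m start) (by omega) hgv
      rw [hl] at t1
      rw [hV1l] at t2
      omega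
    simp only [pvDfsA]
    rw [pyGetD_bridge graph [] hgl hstart, pySetD_bridge V true hl hstart, adj_def]
    obtain ⟨a1, a2, a3, a4, a5, a6⟩ :=
      foldA_spec ih (pvAdj graph (pvCell m start)) (fun b hb => hAdjR _ b hb)
        1 (V.set (pvCell m start) true) hV1l hcf1
    have hgv1 : pvGv (V.set (pvCell m start) true) (pvCell m start) = true := by
      rw [gv_set, if_pos ⟨rfl, by omega⟩]
    refine ⟨a1, pvLe_trans pvLe_of_set a2, by omega, a2 _ hgv1, ?_, by omega⟩
    intro j hj1 hj2 b hb hbr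
    by_cases hjs : j = pvCell m start
    · exact a4 b (hjs ▸ hb) hbr
    · have : pvGv (V.set (pvCell m start) true) j = false := by
        rw [gv_set, if_neg (by tauto)]
        exact hj1
      exact a5 j this hj2 b hb hbr

def pvDfsMinPack (graph : List (List Int)) (removed : Int) (m : Nat) (W : List Bool) (fuel : Nat) : Prop :=
  ∀ start V, pvInR m start → V.length = m → pvLe V W → pvGv W (pvCell m start) = true →
    pvLe (pvDfsA graph removed fuel start V).2 W

lemma foldA_min {graph : List (List Int)} {removed : Int} {m : Nat} {W : List Bool} {f : Nat}
    (hdfs : pvDfsMinPack graph removed m W f) :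
    ∀ (nodes : List Int), (∀ b ∈ nodes, pvInR m b) →
      (∀ b ∈ nodes, b ≠ removed → pvGv W (pvCell m b) = true) →
    ∀ (cnt : Int) (V : List Bool), V.length = m → pvLe V W →
      pvLe (nodes.foldl (pvStepA graph removed (pvDfsA graph removed f)) (cnt, V)).2 W := by
  intro nodes
  induction nodes with
  | nil => intro _ _ cnt V _ hle; exact hle
  | cons node rest ihn =>
    intro hn hW cnt V hl hle
    rw [List.foldl_cons]
    have hnode : pvInR m node := hn node (by simp)
    have hrest : ∀ b ∈ rest, pvInR m b := fun b hb => hn b (by simp [hb])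
    have hWrest : ∀ b ∈ rest, b ≠ removed → pvGv W (pvCell m b) = true :=
      fun b hb => hW b (by simp [hb])
    by_cases hrem : (node == removed) = true
    · have hstep : pvStepA graph removed (pvDfsA graph removed f) (cnt, V) node = (cnt, V) := by
        unfold pvStepA; rw [if_pos hrem]
      rw [hstep]
      exact ihn hrest hWrest cnt V hl hle
    · by_cases hvis : PySem.List.pyGetD V node false = true
      · have hstep : pvStepA graph removed (pvDfsA graph removed f) (cnt, V) node = (cnt, V) := by
          unfold pvStepA; rw [if_neg (by simp [hrem]), if_pos hvis]
        rw [hstep]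
        exact ihn hrest hWrest cnt V hl hle
      · have hstep : pvStepA graph removed (pvDfsA graph removed f) (cnt, V) node =
            (cnt + (pvDfsA graph removed f node V).1, (pvDfsA graph removed f node V).2) := by
          unfold pvStepA; rw [if_neg (by simp [hrem]), if_neg hvis]
        rw [hstep]
        have hWn : pvGv W (pvCell m node) = true :=
          hW node (by simp) (by simpa using hrem)
        have hmin := hdfs node V hnode hl hle hWn
        exact ihn hrest hWrest (cnt + (pvDfsA graph removed f node V).1)
          (pvDfsA graph removed f node V).2 ((dfsA_len f node V).trans hl) hmin

lemma dfsA_min {graph : List (List Int)} {removed : Int} {m : Nat} {W : List Bool}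
    (hgl : graph.length = m)
    (hAdjR : ∀ j b, b ∈ pvAdj graph j → pvInR m b)
    (hCl : pvClosedA graph removed m W) :
    ∀ fuel, pvDfsMinPack graph removed m W fuel := by
  intro fuel
  induction fuel with
  | zero => intro start V _ _ hle _; exact hle
  | succ f ih =>
    intro start V hstart hl hle hWs
    have hcs : pvCell m start < m := pvCell_lt hstart
    simp only [pvDfsA]
    rw [pyGetD_bridge graph [] hgl hstart, pySetD_bridge V true hl hstart, adj_def]
    exact foldA_min ih (pvAdj graph (pvCell m start)) (fun b hb => hAdjR _ b hb)
      (fun b hb hbr => hCl (pvCell m start) hcs hWs b hb hbr)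
      1 (V.set (pvCell m start) true) (by simp [hl]) (pvLe_set_true hle hWs)

-- ===== PORT B: pass and loop =====

lemma relax_props {v : Int} {m : Nat} {a b : Int} (ha : pvInR m a) (hb : pvInR m b)
    (s : List Bool × Bool) (hl : s.1.length = m) :
    (pvRelax v s a b).1.length = m ∧
    pvLe s.1 (pvRelax v s a b).1 ∧
    (s.2 = true → (pvRelax v s a b).2 = true) ∧
    ((pvRelax v s a b).2 = false → (pvRelax v s a b).1 = s.1 ∧ s.2 = false ∧
      (pvGv s.1 (pvCell m a) = true → b ≠ v → pvGv s.1 (pvCell m b) = true)) ∧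
    ((pvRelax v s a b).2 = true → s.2 = true ∨ s.1.count true < (pvRelax v s a b).1.count true) ∧
    (s.1.count true ≤ (pvRelax v s a b).1.count true) ∧
    (∀ X, pvLe s.1 X →
      (pvGv X (pvCell m a) = true → b ≠ v → pvGv X (pvCell m b) = true) →
      pvLe (pvRelax v s a b).1 X) := by
  obtain ⟨W, ch⟩ := s
  simp only at hl
  have hca : pvCell m a < m := pvCell_lt ha
  have hcb : pvCell m b < m := pvCell_lt hb
  unfold pvRelax
  dsimp only
  rw [pyGetD_bridge W false hl ha, pyGetD_bridge W false hl hb, pySetD_bridge W true hl hb]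
  simp only [gv_def]
  split_ifs with hg
  · obtain ⟨⟨hga, hgne⟩, hgb⟩ : (pvGv W (pvCell m a) = true ∧ (!(b == v)) = true) ∧
        pvGv W (pvCell m b) = false := by simpa [Bool.and_eq_true] using hg
    have hne : b ≠ v := by simpa using hgne
    have hbl : pvCell m b < W.length := by omega
    refine ⟨by simp [hl], pvLe_of_set, fun _ => rfl, by simp, ?_, ?_, ?_⟩
    · intro _
      right
      rw [count_set_true hbl hgb]
      omega
    · rw [count_set_true hbl hgb]
      omega
    · intro X hle hcl
      exact pvLe_set_true hle (hcl (hle _ hga) hne)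
  · refine ⟨hl, pvLe_refl W, fun h => h, ?_, fun h => Or.inl h, le_refl _, fun X hle _ => hle⟩
    intro h
    refine ⟨rfl, h, fun hga hne => ?_⟩
    cases hgb : pvGv W (pvCell m b) with
    | true => rfl
    | false =>
      exact absurd (by simp [hga, hgb, hne]) hg

lemma stepB_props {v : Int} {m : Nat} {p : Int × Int}
    (hp : pvInR m p.1 ∧ pvInR m p.2) (s : List Bool × Bool) (hl : s.1.length = m) :
    (pvStepB v s p).1.length = m ∧
    pvLe s.1 (pvStepB v s p).1 ∧
    (s.2 = true → (pvStepB v s p).2 = true) ∧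
    ((pvStepB v s p).2 = false → (pvStepB v s p).1 = s.1 ∧ s.2 = false ∧ pvPairClosed v m p s.1) ∧
    ((pvStepB v s p).2 = true → s.2 = true ∨ s.1.count true < (pvStepB v s p).1.count true) ∧
    (s.1.count true ≤ (pvStepB v s p).1.count true) ∧
    (∀ W, pvLe s.1 W → pvPairClosed v m p W → pvLe (pvStepB v s p).1 W) := by
  obtain ⟨R1len, R1le, R1mono, R1false, R1cnt, R1cnt2, R1min⟩ :=
    relax_props hp.1 hp.2 s hl (v := v)
  obtain ⟨R2len, R2le, R2mono, R2false, R2cnt, R2cnt2, R2min⟩ :=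
    relax_props hp.2 hp.1 (pvRelax v s p.1 p.2) R1len (v := v)
  unfold pvStepB
  refine ⟨R2len, pvLe_trans R1le R2le, fun h => R2mono (R1mono h), ?_, ?_,
    le_trans R1cnt2 R2cnt2, ?_⟩
  · intro h
    obtain ⟨e2, f2, cl2⟩ := R2false h
    obtain ⟨e1, f1, cl1⟩ := R1false f2
    rw [e1] at e2 cl2
    exact ⟨e2, f1, cl1, cl2⟩
  · intro h
    rcases R2cnt h with h1 | h1
    · rcases R1cnt h1 with h2 | h2
      · exact Or.inl h2
      · exact Or.inr (lt_of_lt_of_le h2 R2cnt2)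
    · exact Or.inr (lt_of_le_of_lt R1cnt2 h1)
  · intro W hle hcl
    exact R2min W (R1min W hle hcl.1) hcl.2

lemma passB_aux {v : Int} {m : Nat} {wires : List (Int × Int)}
    (hw : ∀ p ∈ wires, pvInR m p.1 ∧ pvInR m p.2) :
    ∀ (s : List Bool × Bool), s.1.length = m →
      ((wires.foldl (pvStepB v) s).1.length = m) ∧
      pvLe s.1 (wires.foldl (pvStepB v) s).1 ∧
      ((wires.foldl (pvStepB v) s).2 = false →
        (wires.foldl (pvStepB v) s).1 = s.1 ∧ s.2 = false ∧ pvClosedW wires v m s.1) ∧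
      ((wires.foldl (pvStepB v) s).2 = true →
        s.2 = true ∨ s.1.count true < (wires.foldl (pvStepB v) s).1.count true) ∧
      (s.1.count true ≤ (wires.foldl (pvStepB v) s).1.count true) ∧
      (∀ W, pvLe s.1 W → pvClosedW wires v m W → pvLe (wires.foldl (pvStepB v) s).1 W) := by
  induction wires with
  | nil =>
    intro s hl
    exact ⟨hl, pvLe_refl _, fun h => ⟨rfl, h, fun p hp => absurd hp (List.not_mem_nil)⟩,
      fun h => Or.inl h, le_refl _, fun W hle _ => hle⟩
  | cons p rest ih =>
    intro s hl
    rw [List.foldl_cons]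
    obtain ⟨Slen, Sle, Smono, Sfalse, Scnt, Scnt2, Smin⟩ := stepB_props (hw p (by simp)) s hl
    have hrest : ∀ q ∈ rest, pvInR m q.1 ∧ pvInR m q.2 := fun q hq => hw q (by simp [hq])
    obtain ⟨Ilen, Ile, Ifalse, Icnt, Icnt2, Imin⟩ := ih hrest (pvStepB v s p) Slen
    refine ⟨Ilen, pvLe_trans Sle Ile, ?_, ?_, le_trans Scnt2 Icnt2, ?_⟩
    · intro h
      obtain ⟨e, f, cl⟩ := Ifalse h
      obtain ⟨e1, f1, cl1⟩ := Sfalse f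
      rw [e1] at e cl
      refine ⟨e, f1, fun q hq => ?_⟩
      rcases List.mem_cons.mp hq with rfl | hq'
      · exact cl1
      · exact cl q hq'
    · intro h
      rcases Icnt h with h1 | h1
      · rcases Scnt h1 with h2 | h2
        · exact Or.inl h2
        · exact Or.inr (lt_of_lt_of_le h2 Icnt2)
      · exact Or.inr (lt_of_le_of_lt Scnt2 h1)
    · intro W hle hcl
      exact Imin W (Smin W hle (hcl p (by simp))) (fun q hq => hcl q (by simp [hq]))

lemma loopB_spec {wires : List (Int × Int)} {v : Int} {m : Nat}
    (hw : ∀ p ∈ wires, pvInR m p.1 ∧ pvInR m p.2) :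
    ∀ fuel (V : List Bool), V.length = m → V.count false < fuel →
      (pvLoopB wires v fuel V).length = m ∧
      pvLe V (pvLoopB wires v fuel V) ∧
      pvClosedW wires v m (pvLoopB wires v fuel V) ∧
      (∀ W, pvLe V W → pvClosedW wires v m W → pvLe (pvLoopB wires v fuel V) W) := by
  intro fuel
  induction fuel with
  | zero => intro V _ h; omega
  | succ f ih =>
    intro V hl hcf
    obtain ⟨Plen, Ple, Pfalse, Pcnt, Pcnt2, Pmin⟩ := passB_aux hw (V, false) hl
    simp only [pvLoopB]
    unfold pvPassB
    cases hch : (wires.foldl (pvStepB v) (V, false)).2 with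
    | false =>
      obtain ⟨e, _, cl⟩ := Pfalse hch
      rw [if_neg (by simp), e]
      exact ⟨hl, pvLe_refl V, cl, fun W hle _ => hle⟩
    | true =>
      have hlt : V.count true < (wires.foldl (pvStepB v) (V, false)).1.count true := by
        rcases Pcnt hch with h | h
        · cases h
        · exact h
      have hcf' : (wires.foldl (pvStepB v) (V, false)).1.count false < f := by
        have t1 := List.count_true_add_count_false V
        have t2 := List.count_true_add_count_false (wires.foldl (pvStepB v) (V, false)).1
        rw [hl] at t1
        rw [Plen] at t2
        omega
      obtain ⟨Ilen, Ile, Icl, Imin⟩ := ih (wires.foldl (pvStepB v) (V, false)).1 Plen hcf'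
      rw [if_pos rfl]
      exact ⟨Ilen, pvLe_trans Ple Ile, Icl,
        fun W hle hcl => Imin W (Pmin W hle hcl) hcl⟩

-- ===== assembly =====

lemma per_wire (n : Int) (wires : List (Int × Int)) (hpre : Pre_solution n wires)
    (p : Int × Int) (hp : p ∈ wires) :
    (pvDfsA (pvBuildGraph wires (List.replicate (n+1).toNat []))
        p.2 ((n+1).toNat + 1) p.1 (List.replicate (n+1).toNat false)).1 =
    ((pvLoopB wires p.2 ((n+1).toNat + 1)
        (PySem.List.pySetD (List.replicate (n+1).toNat false) p.1 true)).count true : Int) := by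
  set m := (n+1).toNat with hm
  have hmi : (m : Int) = n + 1 := by
    have := (hpre p hp).1
    omega
  have hw : ∀ q ∈ wires, pvInR m q.1 ∧ pvInR m q.2 := by
    intro q hq
    have h := hpre q hq
    exact ⟨⟨by omega, by omega⟩, ⟨by omega, by omega⟩⟩
  have hp1 : pvInR m p.1 := (hw p hp).1
  have hp2 : pvInR m p.2 := (hw p hp).2
  have hc1 : pvCell m p.1 < m := pvCell_lt hp1
  set graph := pvBuildGraph wires (List.replicate m []) with hg
  have hgl : graph.length = m := by rw [hg, build_len]; simp
  have hAdjR : ∀ j b, b ∈ pvAdj graph j → pvInR m b := adjR_of_wires hw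
  set fresh := List.replicate m false with hfr
  have hfl : fresh.length = m := by simp [hfr]
  have hfgv : ∀ j, pvGv fresh j = false := fun j => gv_replicate m j
  have hfc : fresh.count true = 0 := count_true_replicate m
  have hff : fresh.count false < m + 1 :=
    lt_of_le_of_lt (hfl ▸ List.count_le_length) (by omega)
  -- A side
  obtain ⟨A1, A2, A3, A4, A5, A6⟩ :=
    dfsA_spec hgl hAdjR (m + 1) p.1 fresh hp1 hfl (hfgv _) hff
  set VA := (pvDfsA graph p.2 (m + 1) p.1 fresh).2 with hva
  have hClA : pvClosedA graph p.2 m VA :=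
    fun j _ hjt b hb hbr => A5 j (hfgv j) hjt b hb hbr
  have hClWA : pvClosedW wires p.2 m VA := by
    intro q hq
    constructor
    · intro h1 hne
      exact hClA (pvCell m q.1) (pvCell_lt (hw q hq).1) h1 q.2
        ((adj_iff hw _ _).mpr ⟨q, hq, Or.inl ⟨rfl, rfl⟩⟩) hne
    · intro h1 hne
      exact hClA (pvCell m q.2) (pvCell_lt (hw q hq).2) h1 q.1
        ((adj_iff hw _ _).mpr ⟨q, hq, Or.inr ⟨rfl, rfl⟩⟩) hne
  -- B side
  rw [pySetD_bridge fresh true hfl hp1]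
  set V0 := fresh.set (pvCell m p.1) true with hv0
  have hv0l : V0.length = m := by simp [hv0, hfl]
  have hv0c : V0.count false < m + 1 :=
    lt_of_le_of_lt (hv0l ▸ List.count_le_length) (by omega)
  obtain ⟨B1, B2, B3, B4⟩ := loopB_spec hw (m + 1) V0 hv0l hv0c
  set VB := pvLoopB wires p.2 (m + 1) V0 with hvb
  have hv0s : pvGv V0 (pvCell m p.1) = true := by
    rw [hv0, gv_set, if_pos ⟨rfl, by omega⟩]
  -- VA ≤ VB
  have hClAB : pvClosedA graph p.2 m VB := by
    intro j _ hjt b hb hbr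
    rcases (adj_iff hw j b).mp hb with ⟨q, hq, ⟨hcell, rfl⟩ | ⟨hcell, rfl⟩⟩
    · exact (B3 q hq).1 (hcell ▸ hjt) hbr
    · exact (B3 q hq).2 (hcell ▸ hjt) hbr
  have hAB : pvLe VA VB := by
    refine dfsA_min hgl hAdjR hClAB (m + 1) p.1 fresh hp1 hfl ?_ (B2 _ hv0s)
    intro j hj
    rw [hfgv j] at hj
    cases hj
  -- VB ≤ VA
  have hBA : pvLe VB VA := by
    refine B4 VA ?_ hClWA
    intro j hj
    rw [hv0, gv_set] at hj
    by_cases hjs : pvCell m p.1 = j ∧ pvCell m p.1 < fresh.length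
    · exact hjs.1 ▸ A4
    · rw [if_neg hjs] at hj
      rw [hfgv j] at hj
      cases hj
  have hEQ : VA = VB := pvEq_of_le_le (A1.trans B1.symm) hAB hBA
  rw [A6, hfc, ← hEQ]
  omega


-- ===== VERDICT (by name: the statement is the Claim_ definition above) =====
theorem solution_spec : Claim_equal_solution := by
  intro n wires _ hpre
  unfold Spec_solution solution solution_alt
  dsimp only
  have habs : ∀ c : Int, |c - (n - c)| = |2 * c - n| := by
    intro c
    congr 1
    ring
  have key : ∀ (l : List (Int × Int)), (∀ p ∈ l, p ∈ wires) → ∀ acc : Int,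
      l.foldl (fun answer p =>
        min answer |(pvDfsA (pvBuildGraph wires (List.replicate (n+1).toNat []))
            p.2 ((n+1).toNat + 1) p.1 (List.replicate (n+1).toNat false)).1 -
          (n - (pvDfsA (pvBuildGraph wires (List.replicate (n+1).toNat []))
            p.2 ((n+1).toNat + 1) p.1 (List.replicate (n+1).toNat false)).1)|) acc =
      l.foldl (fun best p =>
        min best |2 * ((pvLoopB wires p.2 ((n+1).toNat + 1)
            (PySem.List.pySetD (List.replicate (n+1).toNat false) p.1 true)).count true : Int) - n|) acc := by
    intro l
    induction l with
    | nil => intro _ acc; rfl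
    | cons p rest ih =>
      intro hl acc
      rw [List.foldl_cons, List.foldl_cons]
      have hpw := per_wire n wires hpre p (hl p (by simp))
      rw [hpw, habs]
      exact ih (fun q hq => hl q (by simp [hq])) _
  exact key wires (fun p hp => hp) n
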